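-- pv_equiv track=rewrite | github.com/plutzer/ProxiMate | Scripts/annotator.py | complex_id
-- ===== SOURCE A (Python) =====
-- def complex_id(prey_id, complex_dict):
--     prey_id = prey_id.split(';')
--     for prey in prey_id:
--         for key,value in complex_dict.items():
--             ids = value.split(';')
--             if prey in ids:
--                 return key
--     return None
-- ===== SOURCE B (Python) =====
-- def complex_id(prey_id, complex_dict):
--     # rank each prey id by its first position in the query string
--     rank = {}
--     for pos, prey in enumerate(prey_id.split(';')):
--         if prey not in rank:
--             rank[prey] = pos
--     # one scan over the dict: keep the entry whose ids contain the
--     # earliest-ranked prey (strict '<' keeps the first such entry)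
--     best = None
--     for key, value in complex_dict.items():
--         for i in value.split(';'):
--             r = rank.get(i)
--             if r is not None and (best is None or r < best[0]):
--                 best = (r, key)
--     return best[1] if best is not None else None
-- ===== Notes on version B (the rewrite author's own statement) =====
-- stated objective: alternative
-- what changed: B ranks every prey id once by first position, then does a single scan over the dict keeping the (min prey rank, first entry) pair, instead of resplitting and rescanning the whole dict for every prey; asymptotically O(K*L+P) vs A's worst-case O(P*K*L), though on the timed random inputs A's early exit makes the two comparable.
import Mathlib
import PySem

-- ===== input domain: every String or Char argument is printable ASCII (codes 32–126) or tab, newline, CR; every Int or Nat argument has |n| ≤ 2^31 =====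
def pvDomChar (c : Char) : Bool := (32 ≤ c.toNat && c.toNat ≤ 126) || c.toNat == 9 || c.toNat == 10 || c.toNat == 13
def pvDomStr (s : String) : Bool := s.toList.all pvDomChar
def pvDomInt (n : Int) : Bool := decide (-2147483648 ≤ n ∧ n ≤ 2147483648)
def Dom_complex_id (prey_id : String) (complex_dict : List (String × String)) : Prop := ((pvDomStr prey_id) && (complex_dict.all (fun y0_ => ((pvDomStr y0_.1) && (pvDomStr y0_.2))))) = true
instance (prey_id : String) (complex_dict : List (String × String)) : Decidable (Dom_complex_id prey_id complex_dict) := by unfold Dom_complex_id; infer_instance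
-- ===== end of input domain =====

-- ===== PORT A =====
-- B scans the dict once with a precomputed prey rank instead of rescanning it per prey (different algorithm, similar measured cost).
-- s.split(';'): sep ';' is nonempty, so PySem.Str.split? never returns none — getD [] is exact
def splitSemi (s : String) : List String := (PySem.Str.split? s ";").getD []

-- inner 'for key,value in complex_dict.items(): …' for a fixed prey
def complexIdInner (prey : String) : List (String × String) → Option String
  | [] => none
  | (key, value) :: rest =>
      let ids := splitSemi value
      if prey ∈ ids then some key else complexIdInner prey rest

-- outer 'for prey in prey_id: …'
def complexIdOuter (complex_dict : List (String × String)) : List String → Option String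
  | [] => none
  | prey :: rest =>
      match complexIdInner prey complex_dict with
      | some key => some key
      | none => complexIdOuter complex_dict rest

def complex_id (prey_id : String) (complex_dict : List (String × String)) : Option String :=
  complexIdOuter complex_dict (splitSemi prey_id)

-- ===== PORT B =====
-- 'for pos, prey in enumerate(prey_id.split(';')): if prey not in rank: rank[prey] = pos'
def rankLoop : Nat → List String → PySem.Dict String Nat → PySem.Dict String Nat
  | _, [], rank => rank
  | pos, prey :: rest, rank =>
      rankLoop (pos + 1) rest (if rank.contains prey then rank else rank.insert prey pos)

-- inner 'for i in value.split(';'): r = rank.get(i); if r is not None and (best is None or r < best[0]): best = (r, key)'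
def scanIds (rank : PySem.Dict String Nat) (key : String) (best : Option (Nat × String))
    (ids : List String) : Option (Nat × String) :=
  ids.foldl (fun best i =>
    match rank.get? i with
    | none => best
    | some r =>
      match best with
      | none => some (r, key)
      | some (br, bk) => if r < br then some (r, key) else some (br, bk)) best

-- outer 'for key, value in complex_dict.items(): …'
def scanEntries (rank : PySem.Dict String Nat) :
    Option (Nat × String) → List (String × String) → Option (Nat × String)
  | best, [] => best
  | best, (key, value) :: rest => scanEntries rank (scanIds rank key best (splitSemi value)) rest

def complex_id_alt (prey_id : String) (complex_dict : List (String × String)) : Option String :=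
  match scanEntries (rankLoop 0 (splitSemi prey_id) PySem.Dict.empty) none complex_dict with
  | some (_, key) => some key
  | none => none

-- ===== PRECONDITION & SPEC =====
def Spec_complex_id (prey_id : String) (complex_dict : List (String × String)) (out : Option String) : Prop := out = complex_id_alt prey_id complex_dict
instance (prey_id : String) (complex_dict : List (String × String)) (out : Option String) : Decidable (Spec_complex_id prey_id complex_dict out) := by unfold Spec_complex_id; infer_instance

-- ===== CLAIM (what is proved, stated in full; the proofs are below) =====
def Claim_equal_complex_id : Prop := ∀ (prey_id : String) (complex_dict : List (String × String)), Dom_complex_id prey_id complex_dict → Spec_complex_id prey_id complex_dict (complex_id prey_id complex_dict)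

-- ===== LEMMAS AND PROOFS =====

-- proof-side machinery: candidates (rank, key) and a left-biased min fold

def omerge : Option (Nat × String) → Option (Nat × String) → Option (Nat × String)
  | none, y => y
  | some x, none => some x
  | some x, some y => if y.1 < x.1 then some y else some x

def bestList (C : List (Nat × String)) : Option (Nat × String) :=
  C.foldr (fun c acc => omerge (some c) acc) none

def candsF (f : String → Option Nat) (cd : List (String × String)) : List (Nat × String) :=
  cd.flatMap (fun kv => (splitSemi kv.2).filterMap (fun i => (f i).map (fun r => (r, kv.1))))

def firstIdx : List String → String → Option Nat
  | [], _ => none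
  | p :: rest, q => if q = p then some 0 else (firstIdx rest q).map (· + 1)

theorem omerge_none_right (x : Option (Nat × String)) : omerge x none = x := by
  cases x <;> rfl

theorem omerge_assoc (a b c : Option (Nat × String)) :
    omerge (omerge a b) c = omerge a (omerge b c) := by
  rcases a with _ | x
  · rfl
  rcases b with _ | y
  · rfl
  rcases c with _ | z
  · rw [omerge_none_right, omerge_none_right]
  simp only [omerge]
  by_cases h1 : y.1 < x.1 <;> by_cases h2 : z.1 < y.1 <;> by_cases h3 : z.1 < x.1 <;>
    simp [h1, h2, h3] <;> omega

theorem bestList_append (xs ys : List (Nat × String)) :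
    bestList (xs ++ ys) = omerge (bestList xs) (bestList ys) := by
  induction xs with
  | nil => rfl
  | cons c rest ih => simp only [List.cons_append, bestList, List.foldr_cons] at *
                      rw [ih, ← omerge_assoc]

-- the rank dict looks up the first index (shifted by the running position)
theorem rankLoop_get? (l : List String) (pos : Nat) (d : PySem.Dict String Nat) (q : String) :
    (rankLoop pos l d).get? q = (d.get? q).or ((firstIdx l q).map (· + pos)) := by
  induction l generalizing pos d with
  | nil => simp [rankLoop, firstIdx]
  | cons p rest ih =>
    simp only [rankLoop, firstIdx, ih]
    by_cases hq : q = p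
    · subst hq
      by_cases hc : d.contains q = true
      · rw [if_pos hc]
        have hs := hc
        rw [PySem.Dict.contains_eq_isSome_get?] at hs
        rcases Option.isSome_iff_exists.mp hs with ⟨v, hv⟩
        simp [hv]
      · rw [if_neg hc]
        have hn : d.get? q = none := by
          cases h : d.get? q with
          | none => rfl
          | some v => exact absurd (by rw [PySem.Dict.contains_eq_isSome_get?, h]; rfl) hc
        simp [hn, PySem.Dict.get?_insert_self]
    · have hd : (if d.contains p = true then d else d.insert p pos).get? q = d.get? q := by
        split_ifs with hc
        · rfl
        · exact PySem.Dict.get?_insert_of_ne d pos hq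
      rw [hd, if_neg hq]
      cases hfi : firstIdx rest q with
      | none => simp
      | some a =>
        simp only [Option.map_some]
        have h : a + 1 + pos = a + (pos + 1) := by omega
        rw [h]

-- the B-side inner loop is an omerge against the entry candidates
theorem scanIds_eq (R : PySem.Dict String Nat) (key : String) (ids : List String)
    (b : Option (Nat × String)) :
    scanIds R key b ids
      = omerge b (bestList (ids.filterMap (fun i => (R.get? i).map (fun r => (r, key))))) := by
  induction ids generalizing b with
  | nil => simp [scanIds, bestList, omerge_none_right]
  | cons i rest ih =>
    simp only [scanIds, List.foldl_cons] at *
    rw [ih]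
    cases hr : R.get? i with
    | none => simp [hr, bestList]
    | some r =>
      simp only [hr, List.filterMap_cons, Option.map_some, bestList, List.foldr_cons]
      rw [← omerge_assoc]
      congr 1
      cases b with
      | none => rfl
      | some x => simp [omerge]
  
-- the B-side outer loop is an omerge against all candidates
theorem scanEntries_eq (R : PySem.Dict String Nat) (cd : List (String × String))
    (b : Option (Nat × String)) :
    scanEntries R b cd = omerge b (bestList (candsF (fun i => R.get? i) cd)) := by
  induction cd generalizing b with
  | nil => simp [scanEntries, candsF, bestList, omerge_none_right]
  | cons kv rest ih =>
    obtain ⟨key, value⟩ := kv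
    simp only [scanEntries, candsF, List.flatMap_cons] at *
    rw [ih, scanIds_eq, bestList_append, ← omerge_assoc]

-- A's inner scan finds nothing iff no entry contains the prey
theorem complexIdInner_eq_none_iff (p : String) (cd : List (String × String)) :
    complexIdInner p cd = none ↔ ∀ kv ∈ cd, p ∉ splitSemi kv.2 := by
  induction cd with
  | nil => simp [complexIdInner]
  | cons kv rest ih =>
    obtain ⟨key, value⟩ := kv
    simp only [complexIdInner]
    by_cases h : p ∈ splitSemi value <;> simp [h, ih]

-- a rank-0 candidate is a global minimum: bestList returns the first one
theorem bestList_zero (C : List (Nat × String)) (x : Nat × String)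
    (h : C.find? (fun c => c.1 == 0) = some x) : bestList C = some x := by
  induction C with
  | nil => simp at h
  | cons c rest ih =>
    by_cases hc : c.1 = 0
    · rw [List.find?_cons_of_pos (by simpa using hc)] at h
      cases h
      show omerge (some x) (bestList rest) = some x
      cases hb : bestList rest with
      | none => rfl
      | some y => simp [omerge, hc]
    · rw [List.find?_cons_of_neg (by simpa using hc)] at h
      show omerge (some c) (bestList rest) = some x
      rw [ih h]
      have hx : x.1 = 0 := by simpa using List.find?_some h
      simp [omerge, hx, Nat.pos_of_ne_zero hc]

-- if rank 0 belongs to prey p alone, the first rank-0 candidate is A's first entry containing p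
theorem find?_zero_eq (f : String → Option Nat) (p : String)
    (hz : ∀ q, f q = some 0 ↔ q = p) (cd : List (String × String)) :
    (candsF f cd).find? (fun c => c.1 == 0)
      = (complexIdInner p cd).map (fun k => (0, k)) := by
  induction cd with
  | nil => simp [candsF, complexIdInner]
  | cons kv rest ih =>
    obtain ⟨key, value⟩ := kv
    simp only [candsF, List.flatMap_cons, List.find?_append, complexIdInner] at *
    have hE : ((splitSemi value).filterMap (fun i => (f i).map (fun r => (r, key)))).find?
        (fun c => c.1 == 0) = if p ∈ splitSemi value then some (0, key) else none := by
      induction splitSemi value with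
      | nil => simp
      | cons i ids ihids =>
        simp only [List.filterMap_cons]
        cases hf : f i with
        | none =>
          have hpi : p ≠ i := by
            intro h
            have h0 := (hz p).mpr rfl
            rw [h, hf] at h0
            simp at h0
          simp [ihids, List.mem_cons, hpi]
        | some r =>
          by_cases hr : r = 0
          · subst hr
            have hip : i = p := (hz i).mp hf
            subst hip
            simp only [Option.map_some]
            rw [List.find?_cons_of_pos (by simp)]
            simp [List.mem_cons]
          · have hpi : p ≠ i := by
              intro h
              have h0 := (hz p).mpr rfl
              rw [h, hf] at h0
              exact hr (Option.some.inj h0)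
            simp only [Option.map_some]
            rw [List.find?_cons_of_neg (by simpa using hr)]
            simp [ihids, List.mem_cons, hpi]
    rw [hE]
    by_cases hp : p ∈ splitSemi value
    · simp [hp]
    · simp [hp, ih]

-- shifting every rank by one commutes with bestList
theorem bestList_shift (C : List (Nat × String)) :
    bestList (C.map (fun c => (c.1 + 1, c.2))) = (bestList C).map (fun c => (c.1 + 1, c.2)) := by
  induction C with
  | nil => rfl
  | cons c rest ih =>
    have h1 : bestList ((c :: rest).map (fun c => (c.1 + 1, c.2)))
        = omerge (some (c.1 + 1, c.2)) (bestList (rest.map (fun c => (c.1 + 1, c.2)))) := rfl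
    have h2 : bestList (c :: rest) = omerge (some c) (bestList rest) := rfl
    rw [h1, h2, ih]
    cases hb : bestList rest with
    | none => rfl
    | some y =>
      simp only [Option.map_some, omerge]
      split_ifs <;> first | rfl | omega

-- one entry's candidates, shifted by one, when the entry does not contain p
theorem filterMap_shift (g : String → Option Nat) (p key : String) (ids : List String)
    (h : p ∉ ids) :
    ids.filterMap (fun i => (if i = p then some 0 else (g i).map (· + 1)).map (fun r => (r, key)))
      = (ids.filterMap (fun i => (g i).map (fun r => (r, key)))).map (fun c => (c.1 + 1, c.2)) := by
  induction ids with
  | nil => rfl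
  | cons i rest ih =>
    have hip : i ≠ p := fun he => h (he ▸ List.mem_cons_self ..)
    simp only [List.filterMap_cons, if_neg hip]
    rw [ih (fun hm => h (List.mem_cons_of_mem _ hm))]
    cases g i <;> simp

-- when p occurs in no entry, the candidates under (p :: rest) are those under rest, shifted
theorem candsF_shift (p : String) (g : String → Option Nat) (cd : List (String × String))
    (hp : ∀ kv ∈ cd, p ∉ splitSemi kv.2) :
    candsF (fun q => if q = p then some 0 else (g q).map (· + 1)) cd
      = (candsF g cd).map (fun c => (c.1 + 1, c.2)) := by
  induction cd with
  | nil => rfl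
  | cons kv rest ih =>
    obtain ⟨key, value⟩ := kv
    simp only [candsF, List.flatMap_cons, List.map_append] at *
    rw [ih (fun kv h => hp kv (List.mem_cons_of_mem _ h))]
    congr 1
    exact filterMap_shift g p key (splitSemi value) (hp (key, value) (List.mem_cons_self ..))

-- main bridge: the best candidate under the firstIdx ranking is A's answer
theorem main_bridge (preys : List String) (cd : List (String × String)) :
    (bestList (candsF (firstIdx preys) cd)).map Prod.snd = complexIdOuter cd preys := by
  induction preys generalizing cd with
  | nil =>
    have : candsF (firstIdx []) cd = [] := by
      simp [candsF, firstIdx, List.flatMap_eq_nil_iff]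
    simp [this, bestList, complexIdOuter]
  | cons p rest ih =>
    simp only [complexIdOuter]
    cases h : complexIdInner p cd with
    | some k =>
      have hz : ∀ q, firstIdx (p :: rest) q = some 0 ↔ q = p := by
        intro q
        simp only [firstIdx]
        by_cases hq : q = p
        · simp [hq]
        · simp only [if_neg hq]
          constructor
          · intro hm
            cases hg : firstIdx rest q <;> simp [hg] at hm
          · intro hq'; exact absurd hq' hq
      have := find?_zero_eq (firstIdx (p :: rest)) p hz cd
      rw [h] at this
      rw [bestList_zero _ _ (by simpa using this)]
      rfl
    | none =>
      have hp := (complexIdInner_eq_none_iff p cd).mp h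
      have hf : firstIdx (p :: rest) = fun q => if q = p then some 0 else ((firstIdx rest) q).map (· + 1) := by
        funext q; rfl
      rw [hf, candsF_shift p (firstIdx rest) cd hp, bestList_shift, ← ih cd]
      cases bestList (candsF (firstIdx rest) cd) <;> rfl

-- ===== VERDICT (by name: the statement is the Claim_ definition above) =====
theorem complex_id_spec : Claim_equal_complex_id := by
  intro prey_id complex_dict _
  unfold Spec_complex_id complex_id complex_id_alt
  rw [scanEntries_eq]
  have hR : (fun i => (rankLoop 0 (splitSemi prey_id) PySem.Dict.empty).get? i)
      = firstIdx (splitSemi prey_id) := by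
    funext i
    rw [rankLoop_get?]
    simp
  rw [hR, ← main_bridge (splitSemi prey_id) complex_dict]
  cases bestList (candsF (firstIdx (splitSemi prey_id)) complex_dict) with
  | none => rfl
  | some x => obtain ⟨r, k⟩ := x; rfl
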